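-- pv_equiv track=rewrite | github.com/PuneetSoni4/sum-powerset | sum_powerset_using_binary_bits.py | custom_combinations_binary
-- ===== SOURCE A (Python) =====
-- def custom_combinations_binary(data_list):
--     """ To generate combinations of given data_list using binary """
--
--     # params
--     combinations_list = []
--     counter = 0
--     element_counter = 0
--     length_of_data_list = len(data_list)
--
--     # powerset size
--     powerset_size = pow(2, length_of_data_list)
--
--     for counter in range(powerset_size):
--         for element_counter in range(length_of_data_list):
--             if counter & (1<<element_counter):
--                 combinations_list.append(data_list[element_counter])
--
--     return combinations_list
-- ===== SOURCE B (Python) =====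
-- def custom_combinations_binary(data_list):
--     """ To generate combinations of given data_list using binary """
--     subsets = [[]]
--     for e in data_list:
--         subsets = subsets + [s + [e] for s in subsets]
--     return [x for s in subsets for x in s]
-- ===== Notes on version B (the rewrite author's own statement) =====
-- stated objective: alternative
-- what changed: Replaces the bitmask double loop (testing every bit of every counter) with incremental powerset doubling: the list of subsets is built once by repeated doubling and then flattened, with no bit tests; output size is exponential either way, so the cost is comparable.
import Mathlib
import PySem

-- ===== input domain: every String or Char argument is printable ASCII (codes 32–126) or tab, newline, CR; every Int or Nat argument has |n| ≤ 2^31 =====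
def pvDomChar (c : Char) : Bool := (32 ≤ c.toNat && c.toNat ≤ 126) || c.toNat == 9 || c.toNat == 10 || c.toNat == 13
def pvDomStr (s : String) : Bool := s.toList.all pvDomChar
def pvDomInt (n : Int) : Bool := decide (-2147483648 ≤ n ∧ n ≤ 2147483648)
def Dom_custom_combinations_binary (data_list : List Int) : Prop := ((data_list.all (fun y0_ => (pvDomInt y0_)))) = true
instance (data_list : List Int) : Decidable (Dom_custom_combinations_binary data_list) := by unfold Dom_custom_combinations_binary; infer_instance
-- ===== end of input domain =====

-- B replaces the bitmask double loop by incremental powerset doubling followed by a flatten (same output order).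

-- ===== PORT A =====
-- Literal port of A: for counter in range(2^n): for element_counter in range(n):
--   if counter & (1 << element_counter): append data_list[element_counter].
-- element_counter comes from range(n) so it is nonnegative; '.toNat' on it is exact.
def custom_combinations_binary (data_list : List Int) : List Int :=
  let length_of_data_list := data_list.length
  let powerset_size : Int := 2 ^ length_of_data_list
  (PySem.List.pyRange 0 powerset_size 1).foldl (fun combinations_list counter =>
    (PySem.List.pyRange 0 (length_of_data_list : Int) 1).foldl (fun acc element_counter =>
      if PySem.Int.band counter ((1 : Int) <<< element_counter.toNat) ≠ 0 then
        acc ++ [(PySem.List.pyGet? data_list element_counter).getD 0]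
      else acc) combinations_list) []

-- ===== PORT B =====
def custom_combinations_binary_alt (data_list : List Int) : List Int :=
  (data_list.foldl (fun subsets e => subsets ++ subsets.map (fun s => s ++ [e])) [[]]).flatten

-- ===== PRECONDITION & SPEC =====
def Spec_custom_combinations_binary (data_list : List Int) (out : List Int) : Prop := out = custom_combinations_binary_alt data_list
instance (data_list : List Int) (out : List Int) : Decidable (Spec_custom_combinations_binary data_list out) := by unfold Spec_custom_combinations_binary; infer_instance

-- ===== CLAIM (what is proved, stated in full; the proofs are below) =====
def Claim_equal_custom_combinations_binary : Prop := ∀ (data_list : List Int), Dom_custom_combinations_binary data_list → Spec_custom_combinations_binary data_list (custom_combinations_binary data_list)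

-- ===== LEMMAS AND PROOFS =====

-- the sublist of xs selected by the set bits of m
def pvSub (xs : List Int) (m : Nat) : List Int :=
  ((List.range xs.length).filter (fun j => m.testBit j)).map (fun j => xs.getD j 0)

lemma pvBit (m j : Nat) :
    (PySem.Int.band ((m : Nat) : Int) ((1 : Int) <<< ((j : Nat) : Int)) ≠ 0) ↔ m.testBit j = true := by
  have h1 : (1 : Int) <<< ((j : Nat) : Int) = ((2 ^ j : Nat) : Int) := Int.one_shiftLeft j
  rw [h1, PySem.Int.band_natCast]
  rw [Ne, Int.natCast_eq_zero, Nat.and_two_pow]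
  cases h : m.testBit j <;> simp

lemma pvInner (xs : List Int) (m : Nat) (acc : List Int) :
    (PySem.List.pyRange 0 (xs.length : Int) 1).foldl (fun acc2 j =>
      if PySem.Int.band ((m : Nat) : Int) ((1 : Int) <<< j.toNat) ≠ 0 then
        acc2 ++ [(PySem.List.pyGet? xs j).getD 0]
      else acc2) acc = acc ++ pvSub xs m := by
  rw [PySem.List.pyRange_zero_nat, List.foldl_map]
  rw [PySem.List.foldl_append_ite
        (p := fun j : Nat => PySem.Int.band ((m : Nat) : Int) ((1 : Int) <<< ((((j : Int)).toNat : Nat) : Int)) ≠ 0)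
        (f := fun j : Nat => (PySem.List.pyGet? xs ((j : Int))).getD 0)]
  unfold pvSub
  congr 1
  have hf := List.filter_congr (l := List.range xs.length)
      (p := fun j : Nat => decide (PySem.Int.band ((m : Nat) : Int) ((1 : Int) <<< ((((j : Int)).toNat : Nat) : Int)) ≠ 0))
      (q := fun j : Nat => m.testBit j)
      (fun j _ => by simp [pvBit m j])
  rw [hf]
  apply List.map_congr_left
  intro j hj
  have hjn : j < xs.length := List.mem_range.mp (List.mem_of_mem_filter hj)
  simp [PySem.List.pyGet?, PySem.List.pyIdx?, hjn, List.getD]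

lemma pvSub_append_lt (xs : List Int) (e : Int) (m : Nat) (hm : m < 2 ^ xs.length) :
    pvSub (xs ++ [e]) m = pvSub xs m := by
  unfold pvSub
  rw [List.length_append, List.length_singleton, List.range_succ, List.filter_append]
  rw [show (List.filter (fun j => m.testBit j) [xs.length]) = [] by
    simp [List.filter, Nat.testBit_lt_two_pow hm]]
  rw [List.append_nil]
  apply List.map_congr_left
  intro j hj
  have hjn : j < xs.length := List.mem_range.mp (List.mem_of_mem_filter hj)
  simp [List.getD, List.getElem?_append_left hjn]

lemma pvSub_append_ge (xs : List Int) (e : Int) (m : Nat) (hm : m < 2 ^ xs.length) :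
    pvSub (xs ++ [e]) (2 ^ xs.length + m) = pvSub xs m ++ [e] := by
  unfold pvSub
  rw [List.length_append, List.length_singleton, List.range_succ, List.filter_append]
  have hbitn : (2 ^ xs.length + m).testBit xs.length = true := by
    rw [Nat.testBit_two_pow_add_eq, Nat.testBit_lt_two_pow hm]; rfl
  rw [show (List.filter (fun j => (2 ^ xs.length + m).testBit j) [xs.length]) = [xs.length] by
    simp [List.filter, hbitn]]
  rw [List.filter_congr (fun j hj => by
    rw [Nat.testBit_two_pow_add_gt (List.mem_range.mp hj) m])]
  rw [List.map_append]
  congr 1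
  · apply List.map_congr_left
    intro j hj
    have hjn : j < xs.length := List.mem_range.mp (List.mem_of_mem_filter hj)
    simp [List.getD, List.getElem?_append_left hjn]
  · simp [List.getD]

lemma pvDoubling (xs : List Int) :
    xs.foldl (fun subsets e => subsets ++ subsets.map (fun s => s ++ [e])) [[]]
      = (List.range (2 ^ xs.length)).map (pvSub xs) := by
  induction xs using List.reverseRecOn with
  | nil => simp [pvSub]
  | append_singleton xs e ih =>
    rw [List.foldl_append, List.foldl_cons, List.foldl_nil, ih]
    rw [List.length_append, List.length_singleton, pow_succ,
        show 2 ^ xs.length * 2 = 2 ^ xs.length + 2 ^ xs.length by ring, List.range_add]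
    rw [List.map_append, List.map_map, List.map_map]
    congr 1
    · apply List.map_congr_left
      intro m hm
      exact (pvSub_append_lt xs e m (List.mem_range.mp hm)).symm
    · apply List.map_congr_left
      intro m hm
      simp only [Function.comp]
      exact (pvSub_append_ge xs e m (List.mem_range.mp hm)).symm

lemma pvA_eq (xs : List Int) :
    custom_combinations_binary xs = (List.range (2 ^ xs.length)).flatMap (pvSub xs) := by
  show (PySem.List.pyRange 0 ((2:Int) ^ xs.length) 1).foldl _ [] = _
  rw [show ((2 : Int) ^ xs.length) = ((2 ^ xs.length : Nat) : Int) by push_cast; ring]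
  rw [PySem.List.pyRange_zero_nat (2 ^ xs.length), List.foldl_map]
  refine Eq.trans (PySem.List.foldl_congr_mem (List.range (2 ^ xs.length)) _
      (fun (acc : List Int) (m : Nat) => acc ++ pvSub xs m) []
      (fun acc m _ => pvInner xs m acc)) ?_
  exact PySem.List.foldl_append_eq_flatMap (pvSub xs) (List.range (2 ^ xs.length)) []

-- ===== VERDICT (by name: the statement is the Claim_ definition above) =====
theorem custom_combinations_binary_spec : Claim_equal_custom_combinations_binary := by
  intro xs _
  unfold Spec_custom_combinations_binary custom_combinations_binary_alt
  rw [pvA_eq, pvDoubling, List.flatMap_def]
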